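-- pv_equiv track=rewrite | github.com/mmodi3/Computer-Vision | HW1/Best.py | houghbestlines
-- ===== SOURCE A (Python) =====
-- def houghbestlines(lst):
--     rows = len(lst)
--     cols = len(lst[0])
--     first = second = third = fourth = [0]
--     for i in range(rows):
--         for j in range(cols):
--             curr = [lst[i][j], i, j]
--             if curr[0] > first[0]:
--                 temp1 = first
--                 first = curr
--                 temp2 = second
--                 second = temp1
--                 temp1 = third
--                 third = temp2
--                 temp2 = fourth
--                 fourth = temp1
--             elif curr[0] > second[0]:
--                 temp2 = second
--                 second = curr
--                 temp1 = third
--                 third = temp2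
--                 fourth = temp1
--             elif curr[0] > third[0]:
--                 temp1 = third
--                 third = curr
--                 fourth = temp1
--             elif curr[0] > fourth[0]:
--                 fourth = curr
--     return [first, second, third, fourth]
-- ===== SOURCE B (Python) =====
-- def houghbestlines(lst):
--     rows = len(lst)
--     cols = len(lst[0])
--     cand = [[lst[i][j], i, j] for i in range(rows) for j in range(cols) if lst[i][j] > 0]
--     cand.sort(key=lambda c: -c[0])
--     top = cand[:4]
--     return top + [[0]] * (4 - len(top))
-- ===== Notes on version B (the rewrite author's own statement) =====
-- stated objective: simpler
-- what changed: Replaces the hand-rolled four-slot shift-register scan with a pipeline: collect positive candidates, stable sort descending by value, take the first four, pad with [0].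
import Mathlib
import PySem

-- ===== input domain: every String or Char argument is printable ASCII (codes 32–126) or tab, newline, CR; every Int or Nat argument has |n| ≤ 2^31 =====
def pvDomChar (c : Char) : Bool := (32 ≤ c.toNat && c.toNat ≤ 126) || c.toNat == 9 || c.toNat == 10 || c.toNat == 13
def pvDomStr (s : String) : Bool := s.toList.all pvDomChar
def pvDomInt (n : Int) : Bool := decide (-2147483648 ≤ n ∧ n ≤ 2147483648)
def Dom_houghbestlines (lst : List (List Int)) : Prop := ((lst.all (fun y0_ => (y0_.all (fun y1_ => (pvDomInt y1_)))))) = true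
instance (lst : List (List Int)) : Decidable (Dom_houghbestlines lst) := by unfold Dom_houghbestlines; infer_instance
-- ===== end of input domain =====

-- B replaces A's hand-rolled four-slot shift register with a collect/filter/stable-sort/take-4/pad pipeline; neither version mutates its argument.

-- shared tiny accessor: c[0] (every list indexed here is nonempty, so the default is never returned)
def pvVal (c : List Int) : Int := (PySem.List.pyGet? c 0).getD 0

-- ===== PORT A =====
-- the body of A's doubly-nested loop: the four-way if/elif shift of (first, second, third, fourth)
def pvStep (st : List Int × List Int × List Int × List Int) (curr : List Int) :
    List Int × List Int × List Int × List Int :=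
  if pvVal curr > pvVal st.1 then (curr, st.1, st.2.1, st.2.2.1)
  else if pvVal curr > pvVal st.2.1 then (st.1, curr, st.2.1, st.2.2.1)
  else if pvVal curr > pvVal st.2.2.1 then (st.1, st.2.1, curr, st.2.2.1)
  else if pvVal curr > pvVal st.2.2.2 then (st.1, st.2.1, st.2.2.1, curr)
  else st

def houghbestlines (lst : List (List Int)) : List (List Int) :=
  match PySem.List.pyGet? lst 0 with
  | none => []  -- lst[0] raises IndexError on empty lst; excluded by Pre_
  | some row0 =>
    let rows : Int := PySem.List.len lst
    let cols : Int := PySem.List.len row0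
    let st := (PySem.List.pyRange 0 rows 1).foldl (fun st i =>
      (PySem.List.pyRange 0 cols 1).foldl (fun st j =>
        -- curr = [lst[i][j], i, j]; the .getD defaults are only reached on ragged rows shorter than row 0, where Python raises (excluded by Pre_)
        pvStep st [(PySem.List.pyGet? ((PySem.List.pyGet? lst i).getD []) j).getD 0, i, j]) st)
      ([0], [0], [0], [0])
    [st.1, st.2.1, st.2.2.1, st.2.2.2]

-- ===== PORT B =====
def houghbestlines_alt (lst : List (List Int)) : List (List Int) :=
  match PySem.List.pyGet? lst 0 with
  | none => []  -- lst[0] raises IndexError on empty lst; excluded by Pre_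
  | some row0 =>
    let cand : List (List Int) :=
      (PySem.List.pyRange 0 (PySem.List.len lst) 1).flatMap (fun i =>
        (PySem.List.pyRange 0 (PySem.List.len row0) 1).filterMap (fun j =>
          -- lst[i][j]; the .getD defaults are only reached on ragged rows shorter than row 0, where Python raises (excluded by Pre_)
          let v := (PySem.List.pyGet? ((PySem.List.pyGet? lst i).getD []) j).getD 0
          if v > 0 then some [v, i, j] else none))
    let sortedc := PySem.List.sorted cand (fun c => -(pvVal c)) false
    let top := PySem.List.slice sortedc none (some 4)
    top ++ List.replicate (4 - top.length) [0]

-- ===== PRECONDITION & SPEC =====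
-- Pre_ excludes exactly the inputs where Python A raises IndexError: the empty list (lst[0]) and
-- ragged inputs where some row is shorter than row 0 (lst[i][j] is taken for every j < len(lst[0])).
def Pre_houghbestlines (lst : List (List Int)) : Prop :=
  lst ≠ [] ∧ ∀ r ∈ lst, (lst.headD []).length ≤ r.length
instance (lst : List (List Int)) : Decidable (Pre_houghbestlines lst) := by
  unfold Pre_houghbestlines; infer_instance

def pvWitness_houghbestlines : List (List Int) := [[1, 2], [3, 4]]

def Spec_houghbestlines (lst : List (List Int)) (out : List (List Int)) : Prop := out = houghbestlines_alt lst
instance (lst : List (List Int)) (out : List (List Int)) : Decidable (Spec_houghbestlines lst out) := by unfold Spec_houghbestlines; infer_instance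

-- ===== CLAIM (what is proved, stated in full; the proofs are below) =====
def Claim_equal_houghbestlines : Prop := ∀ (lst : List (List Int)), Dom_houghbestlines lst → Pre_houghbestlines lst → Spec_houghbestlines lst (houghbestlines lst)

-- ===== LEMMAS AND PROOFS =====

lemma pvVal_cons (v : Int) (rest : List Int) : pvVal (v :: rest) = v := by
  simp [pvVal, PySem.List.pyGet?, PySem.List.pyIdx?]

-- the first four entries of a list, padded with [0] to a 4-tuple (A's running state)
def pvPack : List (List Int) → List Int × List Int × List Int × List Int
  | [] => ([0], [0], [0], [0])
  | [a] => (a, [0], [0], [0])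
  | [a, b] => (a, b, [0], [0])
  | [a, b, c] => (a, b, c, [0])
  | a :: b :: c :: d :: _ => (a, b, c, d)

-- packing as a 4-list = take 4 then pad with [0]
lemma pvPack_take (s : List (List Int)) :
    [(pvPack s).1, (pvPack s).2.1, (pvPack s).2.2.1, (pvPack s).2.2.2] =
      s.take 4 ++ List.replicate (4 - (s.take 4).length) [0] := by
  match s with
  | [] => rfl
  | [a] => rfl
  | [a, b] => rfl
  | [a, b, c] => rfl
  | a :: b :: c :: d :: t => rfl

-- one step of A's shift register = stable "insert after all ≥" into the padded top-4 view
lemma pvStep_pack (s : List (List Int)) (c : List Int)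
    (hs : ∀ x ∈ s, 0 < pvVal x) :
    pvStep (pvPack s) c =
      if 0 < pvVal c then
        pvPack (PySem.List.insertBy (fun a b => decide (-(pvVal a) < -(pvVal b))) c s)
      else pvPack s := by
  have h0 : pvVal [0] = 0 := pvVal_cons 0 []
  match s with
  | [] =>
    simp only [pvStep, pvPack, PySem.List.insertBy]
    split_ifs <;> first | rfl | (exfalso; omega)
  | [a] =>
    have ha := hs a (by simp)
    simp only [pvStep, pvPack, PySem.List.insertBy, decide_eq_true_eq]
    split_ifs <;> first | rfl | (exfalso; omega)
  | [a, b] =>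
    have ha := hs a (by simp); have hb := hs b (by simp)
    simp only [pvStep, pvPack, PySem.List.insertBy, decide_eq_true_eq]
    split_ifs <;> first | rfl | (exfalso; omega)
  | [a, b, c'] =>
    have ha := hs a (by simp); have hb := hs b (by simp); have hc := hs c' (by simp)
    simp only [pvStep, pvPack, PySem.List.insertBy, decide_eq_true_eq]
    split_ifs <;> first | rfl | (exfalso; omega)
  | a :: b :: c' :: d :: t =>
    have ha := hs a (by simp); have hb := hs b (by simp)
    have hc := hs c' (by simp); have hd := hs d (by simp)
    simp only [pvStep, pvPack, PySem.List.insertBy, decide_eq_true_eq]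
    split_ifs <;> first | rfl | (exfalso; omega)

-- appending one element to the input of the stable sort = one stable insertion into its output
lemma pv_sorted_append_singleton {α κ : Type} [LT κ] [DecidableLT κ]
    (xs : List α) (x : α) (key : α → κ) :
    PySem.List.sorted (xs ++ [x]) key false =
      PySem.List.insertBy (fun a b => decide (key a < key b)) x
        (PySem.List.sorted xs key false) := by
  rw [PySem.List.sorted_eq_foldl_insertBy, PySem.List.sorted_eq_foldl_insertBy,
    List.foldl_append]
  rfl

-- A's fold over the cell stream = pack of the stable descending sort of the positive cells
lemma pv_fold (cs : List (List Int)) :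
    cs.foldl pvStep ([0], [0], [0], [0]) =
      pvPack (PySem.List.sorted (cs.filter (fun c => decide (0 < pvVal c)))
        (fun c => -(pvVal c)) false) := by
  induction cs using List.reverseRecOn with
  | nil => rfl
  | append_singleton cs c ih =>
    rw [List.foldl_append, List.foldl_cons, List.foldl_nil, ih, List.filter_append]
    rw [pvStep_pack _ _ (fun x hx => by
      have h1 := (PySem.List.mem_sorted _ _ _ _).mp hx
      have h2 := List.of_mem_filter h1
      simpa using h2)]
    by_cases hc : 0 < pvVal c
    · rw [if_pos hc]
      have : List.filter (fun c => decide (0 < pvVal c)) [c] = [c] := by simp [hc]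
      rw [this, pv_sorted_append_singleton]
    · rw [if_neg hc]
      have : List.filter (fun c => decide (0 < pvVal c)) [c] = [] := by simp [hc]
      rw [this, List.append_nil]

-- the row-by-row double loop = one fold over the row-major cell stream
lemma pv_foldl_nested {α β : Type} (I : List α) (J : List β) (f : α → β → List Int)
    (init : List Int × List Int × List Int × List Int) :
    I.foldl (fun st i => J.foldl (fun st j => pvStep st (f i j)) st) init
      = (I.flatMap (fun i => J.map (f i))).foldl pvStep init := by
  induction I generalizing init with
  | nil => rfl
  | cons a I ih =>
    simp only [List.foldl_cons, List.flatMap_cons, List.foldl_append, List.foldl_map, ih]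

-- B's guarded comprehension over one row = map then filter by positive value
lemma pv_filterMap_filter (J : List Int) (i : Int) (f : Int → Int) :
    J.filterMap (fun j => if f j > 0 then some [f j, i, j] else none)
      = (J.map (fun j => [f j, i, j])).filter (fun x => decide (0 < pvVal x)) := by
  induction J with
  | nil => rfl
  | cons a J ih =>
    rw [List.filterMap_cons, List.map_cons, List.filter_cons]
    by_cases h : f a > 0
    · simp only [if_pos h, pvVal_cons, decide_eq_true (by exact_mod_cast h : 0 < f a), ih]
      rfl
    · simp only [if_neg h, pvVal_cons, ih]
      have : decide (0 < f a) = false := by simpa using h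
      rw [this]
      rfl

-- ===== VERDICT (by name: the statement is the Claim_ definition above) =====
theorem houghbestlines_spec : Claim_equal_houghbestlines := by
  intro lst _ _
  unfold Spec_houghbestlines houghbestlines houghbestlines_alt
  cases lst with
  | nil => rfl
  | cons r ls =>
    have hget : PySem.List.pyGet? (r :: ls) (0 : Int) = some r := by
      simp [PySem.List.pyGet?, PySem.List.pyIdx?]
    rw [hget]
    simp only [pv_foldl_nested, pv_filterMap_filter, ← List.filter_flatMap]
    rw [pv_fold, PySem.List.slice_to _ (by norm_num : (0:Int) ≤ 4)]
    have h4 : ((4:Int)).toNat = 4 := rfl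
    rw [h4]
    exact pvPack_take _
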